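-- pv_equiv track=rewrite | github.com/MikeyBeez/ARC1 | pattern_analyze_v6.py | _same_shape
-- ===== SOURCE A (Python) =====
-- from typing import Dict, List, Set, Optional, Tuple
--
-- def _same_shape(pos1: Set[Tuple[int, int]],
--                 pos2: Set[Tuple[int, int]]) -> bool:
--     """Check if two sets of positions form the same shape"""
--     if len(pos1) != len(pos2):
--         return False
--
--     # Normalize positions to origin
--     min_i1 = min(i for i,j in pos1)
--     min_j1 = min(j for i,j in pos1)
--     shape1 = {(i-min_i1, j-min_j1) for i,j in pos1}
--
--     min_i2 = min(i for i,j in pos2)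
--     min_j2 = min(j for i,j in pos2)
--     shape2 = {(i-min_i2, j-min_j2) for i,j in pos2}
--
--     return shape1 == shape2
-- ===== SOURCE B (Python) =====
-- def _same_shape(pos1, pos2):
--     """Check if two sets of positions form the same shape"""
--     if len(pos1) != len(pos2):
--         return False
--     s1 = sorted(pos1)
--     s2 = sorted(pos2)
--     return all((q[0] - p[0], q[1] - p[1]) == (s2[0][0] - s1[0][0], s2[0][1] - s1[0][1])
--                for p, q in zip(s1, s2))
-- ===== Notes on version B (the rewrite author's own statement) =====
-- stated objective: alternative
-- what changed: B sorts both point lists lexicographically and checks that all positionwise differences s2[k]-s1[k] equal the head difference, i.e. a sort-then-scan canonicalization, instead of A's min-based normalization of each set to the origin and set equality.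
import Mathlib
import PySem

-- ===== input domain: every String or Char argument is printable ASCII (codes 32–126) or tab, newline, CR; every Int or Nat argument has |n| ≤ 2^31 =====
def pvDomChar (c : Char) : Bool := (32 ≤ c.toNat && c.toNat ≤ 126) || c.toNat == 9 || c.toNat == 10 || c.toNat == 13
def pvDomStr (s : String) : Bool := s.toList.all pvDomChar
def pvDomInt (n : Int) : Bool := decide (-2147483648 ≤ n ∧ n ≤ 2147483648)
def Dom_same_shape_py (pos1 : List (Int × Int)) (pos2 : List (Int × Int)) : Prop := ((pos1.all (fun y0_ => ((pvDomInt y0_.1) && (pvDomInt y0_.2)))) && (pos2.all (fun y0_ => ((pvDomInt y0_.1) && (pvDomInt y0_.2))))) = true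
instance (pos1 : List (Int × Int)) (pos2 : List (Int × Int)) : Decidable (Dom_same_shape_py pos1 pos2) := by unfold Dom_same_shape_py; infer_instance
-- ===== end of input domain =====

-- B replaces A's min-based normalization of each set plus set equality by a
-- sort-then-scan: lexicographically sort both lists and check every positionwise
-- difference equals the head difference (objective: alternative).

-- ===== PORT A =====
-- min(...) over a nonempty iterable; '.getD 0' is the total form, used ONLY where Pre_
-- guarantees the list is nonempty.
def same_shape_py (pos1 : List (Int × Int)) (pos2 : List (Int × Int)) : Bool :=
  if pos1.length ≠ pos2.length then false
  else
    let min_i1 := (PySem.List.min? (pos1.map (fun p => p.1)) (fun x => x)).getD 0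
    let min_j1 := (PySem.List.min? (pos1.map (fun p => p.2)) (fun x => x)).getD 0
    let shape1 := PySem.Set.ofList (pos1.map (fun p => (p.1 - min_i1, p.2 - min_j1)))
    let min_i2 := (PySem.List.min? (pos2.map (fun p => p.1)) (fun x => x)).getD 0
    let min_j2 := (PySem.List.min? (pos2.map (fun p => p.2)) (fun x => x)).getD 0
    let shape2 := PySem.Set.ofList (pos2.map (fun p => (p.1 - min_i2, p.2 - min_j2)))
    PySem.Set.equal shape1 shape2

-- ===== PORT B =====
-- sorted(tuples) is Python's lexicographic sort = PySem.List.sorted2 with fst/snd keys.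
-- s2[0]/s1[0] appear only inside the generator, which Python evaluates only when the
-- zip is nonempty; '.headD (0, 0)' is the total form of that access.
def same_shape_py_alt (pos1 : List (Int × Int)) (pos2 : List (Int × Int)) : Bool :=
  if pos1.length ≠ pos2.length then false
  else
    let s1 := PySem.List.sorted2 pos1 Prod.fst Prod.snd
    let s2 := PySem.List.sorted2 pos2 Prod.fst Prod.snd
    let p0 := s1.headD (0, 0)
    let q0 := s2.headD (0, 0)
    (s1.zip s2).all (fun pq =>
      decide ((pq.2.1 - pq.1.1, pq.2.2 - pq.1.2) = (q0.1 - p0.1, q0.2 - p0.2)))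

-- ===== PRECONDITION & SPEC =====
-- The parameters are Python sets, so the lists hold distinct elements (Nodup); A raises
-- ValueError (min of an empty sequence) exactly when both lists are empty, so that input
-- is excluded.
def Pre_same_shape_py (pos1 : List (Int × Int)) (pos2 : List (Int × Int)) : Prop :=
  pos1.Nodup ∧ pos2.Nodup ∧ ¬ (pos1 = [] ∧ pos2 = [])
instance (pos1 : List (Int × Int)) (pos2 : List (Int × Int)) : Decidable (Pre_same_shape_py pos1 pos2) := by unfold Pre_same_shape_py; infer_instance

def pvWitness_same_shape_py : (List (Int × Int)) × (List (Int × Int)) :=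
  ([(0, 0), (0, 1)], [(3, 4), (3, 5)])

def Spec_same_shape_py (pos1 : List (Int × Int)) (pos2 : List (Int × Int)) (out : Bool) : Prop := out = same_shape_py_alt pos1 pos2
instance (pos1 : List (Int × Int)) (pos2 : List (Int × Int)) (out : Bool) : Decidable (Spec_same_shape_py pos1 pos2 out) := by unfold Spec_same_shape_py; infer_instance

-- ===== CLAIM (what is proved, stated in full; the proofs are below) =====
def Claim_equal_same_shape_py : Prop := ∀ (pos1 : List (Int × Int)) (pos2 : List (Int × Int)), Dom_same_shape_py pos1 pos2 → Pre_same_shape_py pos1 pos2 → Spec_same_shape_py pos1 pos2 (same_shape_py pos1 pos2)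

-- ===== LEMMAS AND PROOFS =====

-- Lexicographic (Python tuple) order on pairs of integers.
def lexLe (p q : Int × Int) : Prop := p.1 < q.1 ∨ (p.1 = q.1 ∧ p.2 ≤ q.2)

-- Translation by an offset.
def tr (δ : Int × Int) (p : Int × Int) : Int × Int := (p.1 + δ.1, p.2 + δ.2)

lemma lexLe_antisymm {a b : Int × Int} (h1 : lexLe a b) (h2 : lexLe b a) : a = b := by
  unfold lexLe at h1 h2; exact Prod.ext (by omega) (by omega)

-- sorted2's comparison boolean for keys fst/snd.
lemma insertBy_pairwise (x : Int × Int) (acc : List (Int × Int))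
    (h : acc.Pairwise lexLe) :
    (PySem.List.insertBy
      (fun a b => decide (a.1 < b.1) || (!decide (b.1 < a.1) && decide (a.2 < b.2)))
      x acc).Pairwise lexLe := by
  induction acc with
  | nil => simp [PySem.List.insertBy, lexLe]
  | cons y ys ih =>
    rw [List.pairwise_cons] at h
    obtain ⟨hy, hys⟩ := h
    simp only [PySem.List.insertBy]
    split_ifs with hb
    · simp only [Bool.or_eq_true, Bool.and_eq_true, decide_eq_true_eq, Bool.not_eq_true',
        decide_eq_false_iff_not] at hb
      refine List.pairwise_cons.mpr ⟨?_, List.pairwise_cons.mpr ⟨hy, hys⟩⟩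
      intro z hz
      rcases List.mem_cons.mp hz with rfl | hz
      · unfold lexLe; omega
      · have := hy z hz; unfold lexLe at this ⊢; omega
    · simp only [Bool.or_eq_true, Bool.and_eq_true, decide_eq_true_eq, Bool.not_eq_true',
        decide_eq_false_iff_not, not_or, not_and, not_lt] at hb
      refine List.pairwise_cons.mpr ⟨?_, ih hys⟩
      intro z hz
      rcases (PySem.List.mem_insertBy _ x z ys).mp hz with rfl | hz
      · unfold lexLe; omega
      · exact hy z hz

lemma sorted2_lex_pairwise (xs : List (Int × Int)) :
    (PySem.List.sorted2 xs Prod.fst Prod.snd).Pairwise lexLe := by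
  show (xs.foldl _ []).Pairwise lexLe
  have h : ∀ (l : List (Int × Int)) (acc : List (Int × Int)), acc.Pairwise lexLe →
      (l.foldl (fun acc x => PySem.List.insertBy
        (fun a b => decide (a.1 < b.1) || (!decide (b.1 < a.1) && decide (a.2 < b.2)))
        x acc) acc).Pairwise lexLe := by
    intro l
    induction l with
    | nil => intro acc h; exact h
    | cons x l ih => intro acc h; exact ih _ (insertBy_pairwise x acc h)
  exact h xs [] List.Pairwise.nil

-- UNIQUENESS: sorted2 with fst/snd keys is THE lexLe-pairwise rearrangement.
lemma sorted2_lex_eq (xs ys : List (Int × Int)) (hp : ys.Perm xs)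
    (hs : ys.Pairwise lexLe) :
    PySem.List.sorted2 xs Prod.fst Prod.snd = ys :=
  List.eq_of_perm_of_sorted (fun a b _ _ h1 h2 => lexLe_antisymm h1 h2)
    (sorted2_lex_pairwise xs) hs
    ((PySem.List.sorted2_perm xs Prod.fst Prod.snd false).trans hp.symm)

-- Translation is strictly monotone for lexLe.
lemma pairwise_map_tr (δ : Int × Int) (l : List (Int × Int)) (h : l.Pairwise lexLe) :
    (l.map (tr δ)).Pairwise lexLe := by
  refine List.Pairwise.map (tr δ) ?_ h
  intro a b hab; simp only [lexLe, tr] at hab ⊢; omega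

-- sorted2 of a translated rearrangement is the translated sorted2.
lemma sorted2_map_tr (pos1 pos2 : List (Int × Int)) (δ : Int × Int)
    (hperm : pos2.Perm (pos1.map (tr δ))) :
    PySem.List.sorted2 pos2 Prod.fst Prod.snd
      = (PySem.List.sorted2 pos1 Prod.fst Prod.snd).map (tr δ) := by
  refine sorted2_lex_eq _ _ ?_ (pairwise_map_tr δ _ (sorted2_lex_pairwise pos1))
  exact ((PySem.List.sorted2_perm pos1 Prod.fst Prod.snd false).map (tr δ)).trans
    hperm.symm

-- B's zip-scan succeeds exactly when s2 is s1 translated by δ.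
lemma zip_all_eq_map (s1 s2 : List (Int × Int)) (hlen : s1.length = s2.length)
    (δ : Int × Int) :
    ((s1.zip s2).all (fun pq =>
        decide ((pq.2.1 - pq.1.1, pq.2.2 - pq.1.2) = δ))) = true
      ↔ s2 = s1.map (tr δ) := by
  induction s1 generalizing s2 with
  | nil => cases s2 with
    | nil => simp
    | cons q t => simp at hlen
  | cons p t1 ih =>
    cases s2 with
    | nil => simp at hlen
    | cons q t2 =>
      simp only [List.zip_cons_cons, List.all_cons, Bool.and_eq_true, decide_eq_true_eq,
        List.map_cons, List.cons.injEq]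
      rw [ih t2 (by simpa using hlen)]
      constructor
      · rintro ⟨h1, h2⟩
        refine ⟨?_, h2⟩
        rw [Prod.ext_iff] at h1 ⊢
        simp only [tr] at h1 ⊢
        omega
      · rintro ⟨h1, h2⟩
        refine ⟨?_, h2⟩
        subst h1
        rw [Prod.ext_iff]
        simp only [tr]
        omega

-- The value of min(...) is determined by membership and minimality.
lemma min_val_unique (xs : List Int) (m m' : Int)
    (h : PySem.List.min? xs (fun x => x) = some m)
    (hmem : m' ∈ xs) (hmin : ∀ y ∈ xs, m' ≤ y) : m = m' :=
  le_antisymm (PySem.List.min?_isMin h m' hmem)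
    (hmin m (PySem.List.min?_mem h))


-- A's set-equality test, with the four minima generalized to arbitrary offsets, is
-- exactly "pos2 is pos1 translated by the offset difference" (up to rearrangement).
lemma transl_perm (pos1 pos2 : List (Int × Int)) (h1 : pos1.Nodup) (h2 : pos2.Nodup)
    (a b c d : Int) :
    PySem.Set.equal (PySem.Set.ofList (pos1.map (fun p => (p.1 - a, p.2 - b))))
        (PySem.Set.ofList (pos2.map (fun p => (p.1 - c, p.2 - d)))) = true
      ↔ pos2.Perm (pos1.map (tr (c - a, d - b))) := by
  rw [PySem.Set.equal_iff]
  have hinj1 : Function.Injective (fun p : Int × Int => (p.1 - a, p.2 - b)) := by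
    intro x y hxy
    rw [Prod.ext_iff] at hxy ⊢; simp only at hxy ⊢; omega
  have hinj2 : Function.Injective (fun p : Int × Int => (p.1 - c, p.2 - d)) := by
    intro x y hxy
    rw [Prod.ext_iff] at hxy ⊢; simp only at hxy ⊢; omega
  have hcomp : (fun p : Int × Int => (p.1 - c, p.2 - d)) ∘ tr (c - a, d - b)
      = (fun p : Int × Int => (p.1 - a, p.2 - b)) := by
    funext p; rw [Prod.ext_iff]; simp only [Function.comp_apply, tr]; omega
  constructor
  · intro h
    have hperm : (pos1.map (fun p => (p.1 - a, p.2 - b))).Perm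
        (pos2.map (fun p => (p.1 - c, p.2 - d))) := by
      refine (List.perm_ext_iff_of_nodup (h1.map hinj1) (h2.map hinj2)).mpr ?_
      intro x
      have := h x
      simpa [PySem.Set.mem_ofList] using this
    have := hperm.map (fun q : Int × Int => (q.1 + c, q.2 + d))
    rw [List.map_map, List.map_map] at this
    have e1 : ((fun q : Int × Int => (q.1 + c, q.2 + d)) ∘ fun p : Int × Int => (p.1 - a, p.2 - b))
        = tr (c - a, d - b) := by
      funext p; rw [Prod.ext_iff]; simp only [Function.comp_apply, tr]; omega
    have e2 : ((fun q : Int × Int => (q.1 + c, q.2 + d)) ∘ fun p : Int × Int => (p.1 - c, p.2 - d))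
        = id := by
      funext p; rw [Prod.ext_iff]; simp only [Function.comp_apply, id_eq]; omega
    rw [e1, e2, List.map_id] at this
    exact this.symm
  · intro hperm x
    have : (pos2.map (fun p => (p.1 - c, p.2 - d))).Perm
        (pos1.map (fun p => (p.1 - a, p.2 - b))) := by
      have := hperm.map (fun p : Int × Int => (p.1 - c, p.2 - d))
      rwa [List.map_map, hcomp] at this
    simp only [PySem.Set.mem_ofList]
    exact ⟨fun hx => this.symm.mem_iff.mp hx, fun hx => this.mem_iff.mp hx⟩

-- The min over a translated rearrangement is the min shifted by the offset.
lemma min_shift (l1 l2 : List (Int × Int)) (δ : Int × Int) (f : Int × Int → Int) (d : Int)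
    (hperm : l2.Perm (l1.map (tr δ))) (hne : l1 ≠ []) (hf : ∀ p, f (tr δ p) = f p + d) :
    (PySem.List.min? (l2.map f) (fun x => x)).getD 0
      = (PySem.List.min? (l1.map f) (fun x => x)).getD 0 + d := by
  obtain ⟨m1, hm1⟩ : ∃ m1, PySem.List.min? (l1.map f) (fun x => x) = some m1 := by
    cases hh : PySem.List.min? (l1.map f) (fun x => x) with
    | none =>
      rw [PySem.List.min?_eq_none_iff] at hh
      exact absurd (List.map_eq_nil_iff.mp hh) hne
    | some m => exact ⟨m, rfl⟩
  obtain ⟨m2, hm2⟩ : ∃ m2, PySem.List.min? (l2.map f) (fun x => x) = some m2 := by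
    cases hh : PySem.List.min? (l2.map f) (fun x => x) with
    | none =>
      rw [PySem.List.min?_eq_none_iff] at hh
      have h0 := List.map_eq_nil_iff.mp hh
      have hl := hperm.length_eq
      rw [h0] at hl
      simp only [List.length_nil, List.length_map] at hl
      exact absurd (List.eq_nil_of_length_eq_zero hl.symm) hne
    | some m => exact ⟨m, rfl⟩
  have hpf : (l2.map f).Perm ((l1.map f).map (fun x => x + d)) := by
    have hmapped := hperm.map f
    rw [List.map_map] at hmapped
    rw [List.map_map]
    have e : f ∘ tr δ = (fun x => x + d) ∘ f := by
      funext p; simp [Function.comp_apply, hf]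
    rwa [e] at hmapped
  rw [hm1, hm2, Option.getD_some, Option.getD_some]
  refine min_val_unique (l2.map f) m2 (m1 + d) hm2 ?_ ?_
  · refine hpf.mem_iff.mpr ?_
    exact List.mem_map.mpr ⟨m1, PySem.List.min?_mem hm1, rfl⟩
  · intro y hy
    obtain ⟨x, hx, rfl⟩ := List.mem_map.mp (hpf.mem_iff.mp hy)
    have := PySem.List.min?_isMin hm1 x hx
    omega

-- When pos2 is pos1 translated by δ, the heads of the two sorted lists differ by δ.
lemma sorted2_map_head (pos1 pos2 : List (Int × Int)) (δ : Int × Int) (hne : pos1 ≠ [])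
    (hperm : pos2.Perm (pos1.map (tr δ))) :
    (((PySem.List.sorted2 pos2 Prod.fst Prod.snd).headD (0, 0)).1
       - ((PySem.List.sorted2 pos1 Prod.fst Prod.snd).headD (0, 0)).1,
     ((PySem.List.sorted2 pos2 Prod.fst Prod.snd).headD (0, 0)).2
       - ((PySem.List.sorted2 pos1 Prod.fst Prod.snd).headD (0, 0)).2) = δ := by
  have hmap := sorted2_map_tr pos1 pos2 δ hperm
  rw [hmap]
  cases hc : PySem.List.sorted2 pos1 Prod.fst Prod.snd with
  | nil =>
    exfalso
    have := (PySem.List.sorted2_perm pos1 Prod.fst Prod.snd false).length_eq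
    rw [hc] at this
    exact hne (List.eq_nil_of_length_eq_zero this.symm)
  | cons p t =>
    rw [Prod.ext_iff]
    simp only [List.map_cons, List.headD_cons, tr]
    omega

-- ===== VERDICT (by name: the statement is the Claim_ definition above) =====
theorem same_shape_py_spec : Claim_equal_same_shape_py := by
  intro pos1 pos2 _ hpre
  obtain ⟨h1, h2, hne3⟩ := hpre
  unfold Spec_same_shape_py same_shape_py same_shape_py_alt
  by_cases hlen : pos1.length = pos2.length
  · simp only [hlen, ne_eq, not_true_eq_false, if_false]
    have hne : pos1 ≠ [] := by
      intro h
      exact hne3 ⟨h, List.eq_nil_of_length_eq_zero (by rw [← hlen, h]; rfl)⟩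
    have hp1 := PySem.List.sorted2_perm pos1 Prod.fst Prod.snd false
    have hp2 := PySem.List.sorted2_perm pos2 Prod.fst Prod.snd false
    have hs1ne : PySem.List.sorted2 pos1 Prod.fst Prod.snd ≠ [] := by
      intro h
      exact hne (List.eq_nil_of_length_eq_zero (by rw [← hp1.length_eq, h]; rfl))
    have hslen : (PySem.List.sorted2 pos1 Prod.fst Prod.snd).length
        = (PySem.List.sorted2 pos2 Prod.fst Prod.snd).length := by
      rw [hp1.length_eq, hp2.length_eq]; exact hlen
    rw [Bool.eq_iff_iff, transl_perm pos1 pos2 h1 h2, zip_all_eq_map _ _ hslen]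
    constructor
    · intro hperm
      have hδ := sorted2_map_head pos1 pos2 _ hne hperm
      rw [hδ]
      exact sorted2_map_tr pos1 pos2 _ hperm
    · intro hmap
      have hperm0 : pos2.Perm (pos1.map (tr
          (((PySem.List.sorted2 pos2 Prod.fst Prod.snd).headD (0, 0)).1
            - ((PySem.List.sorted2 pos1 Prod.fst Prod.snd).headD (0, 0)).1,
           ((PySem.List.sorted2 pos2 Prod.fst Prod.snd).headD (0, 0)).2
            - ((PySem.List.sorted2 pos1 Prod.fst Prod.snd).headD (0, 0)).2))) := by
        have hm := hp1.map (tr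
          (((PySem.List.sorted2 pos2 Prod.fst Prod.snd).headD (0, 0)).1
            - ((PySem.List.sorted2 pos1 Prod.fst Prod.snd).headD (0, 0)).1,
           ((PySem.List.sorted2 pos2 Prod.fst Prod.snd).headD (0, 0)).2
            - ((PySem.List.sorted2 pos1 Prod.fst Prod.snd).headD (0, 0)).2))
        rw [← hmap] at hm
        exact hp2.symm.trans hm
      have e1 := min_shift pos1 pos2 _ (fun p => p.1) _ hperm0 hne (fun p => rfl)
      have e2 := min_shift pos1 pos2 _ (fun p => p.2) _ hperm0 hne (fun p => rfl)
      have hd : ((PySem.List.min? (pos2.map (fun p => p.1)) (fun x => x)).getD 0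
            - (PySem.List.min? (pos1.map (fun p => p.1)) (fun x => x)).getD 0,
          (PySem.List.min? (pos2.map (fun p => p.2)) (fun x => x)).getD 0
            - (PySem.List.min? (pos1.map (fun p => p.2)) (fun x => x)).getD 0)
          = (((PySem.List.sorted2 pos2 Prod.fst Prod.snd).headD (0, 0)).1
              - ((PySem.List.sorted2 pos1 Prod.fst Prod.snd).headD (0, 0)).1,
             ((PySem.List.sorted2 pos2 Prod.fst Prod.snd).headD (0, 0)).2
              - ((PySem.List.sorted2 pos1 Prod.fst Prod.snd).headD (0, 0)).2) := by
        rw [Prod.ext_iff]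
        constructor <;> simp only [e1, e2] <;> omega
      rw [hd]
      exact hperm0
  · simp [hlen]
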